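-- pv_equiv track=rewrite | github.com/thirtysix/MASTERCONTROL | backend/src/services/session_service.py | _summarize_tool_input
-- ===== SOURCE A (Python) =====
-- def _summarize_tool_input(tool_name: str, tool_input: dict) -> str:
--     """Create a short summary of tool input for display."""
--     if tool_name in ("Read", "read_file"):
--         return tool_input.get("file_path", "?")
--     if tool_name in ("Write", "write_file"):
--         path = tool_input.get("file_path", "?")
--         return f"{path} ({len(tool_input.get('content', ''))} chars)"
--     if tool_name in ("Edit", "edit_file"):
--         return tool_input.get("file_path", "?")
--     if tool_name in ("Bash",):
--         cmd = tool_input.get("command", "?")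
--         return cmd[:80]
--     if tool_name in ("Grep", "search_files"):
--         return tool_input.get("pattern", "?")
--     if tool_name in ("Glob", "list_files"):
--         return tool_input.get("pattern", tool_input.get("path", "?"))
--     for k, v in tool_input.items():
--         return f"{k}: {str(v)[:60]}"
--     return ""
-- ===== SOURCE B (Python) =====
-- # B: declarative recipe table interpreted by one generic engine — each known tool
-- # maps to (key chain, truncation limit, append-content-length flag); a single
-- # interpreter implements every case; unknown tools fall back to the first item.
--
-- _RECIPES = {
--     "Read": (("file_path",), None, False),
--     "read_file": (("file_path",), None, False),
--     "Write": (("file_path",), None, True),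
--     "write_file": (("file_path",), None, True),
--     "Edit": (("file_path",), None, False),
--     "edit_file": (("file_path",), None, False),
--     "Bash": (("command",), 80, False),
--     "Grep": (("pattern",), None, False),
--     "search_files": (("pattern",), None, False),
--     "Glob": (("pattern", "path"), None, False),
--     "list_files": (("pattern", "path"), None, False),
-- }
--
-- def _summarize_tool_input(tool_name: str, tool_input: dict) -> str:
--     recipe = _RECIPES.get(tool_name)
--     if recipe is None:
--         return next((f"{k}: {str(v)[:60]}" for k, v in tool_input.items()), "")
--     keys, limit, with_len = recipe
--     value = "?"
--     for key in keys:
--         if key in tool_input: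
--             value = tool_input[key]
--             break
--     if limit is not None:
--         value = value[:limit]
--     if with_len:
--         value = f"{value} ({len(tool_input.get('content', ''))} chars)"
--     return value
-- ===== Notes on version B (the rewrite author's own statement) =====
-- stated objective: alternative
-- what changed: Replaced the per-tool if/membership chain by a declarative recipe table (key chain, truncation limit, content-length flag) interpreted by one generic engine, so no per-case code paths remain; the first-item fallback for unknown tools is unchanged.
import Mathlib
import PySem

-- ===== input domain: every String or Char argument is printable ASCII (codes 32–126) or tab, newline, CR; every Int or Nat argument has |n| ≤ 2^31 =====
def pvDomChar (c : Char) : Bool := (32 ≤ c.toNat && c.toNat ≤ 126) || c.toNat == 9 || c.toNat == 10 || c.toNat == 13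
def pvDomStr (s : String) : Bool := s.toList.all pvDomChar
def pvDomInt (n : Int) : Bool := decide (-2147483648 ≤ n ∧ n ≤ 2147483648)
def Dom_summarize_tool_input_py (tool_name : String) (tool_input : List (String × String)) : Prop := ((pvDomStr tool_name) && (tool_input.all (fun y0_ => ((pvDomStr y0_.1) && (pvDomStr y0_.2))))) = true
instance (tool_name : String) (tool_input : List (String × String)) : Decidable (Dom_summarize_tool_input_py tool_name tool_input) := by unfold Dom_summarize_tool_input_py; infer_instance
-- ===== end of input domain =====

-- B replaces A's per-tool if/membership chain by a declarative recipe table interpreted by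
-- one generic engine; same return value everywhere (objective: alternative).

-- ===== PORT A =====
-- dict.get(k, dflt) on an association list: first match (Python dict lookup).
def pvDictGetD (d : List (String × String)) (k dflt : String) : String :=
  match d.find? (fun p => p.1 == k) with
  | some p => p.2
  | none => dflt

def summarize_tool_input_py (tool_name : String) (tool_input : List (String × String)) : String :=
  if tool_name == "Read" || tool_name == "read_file" then
    pvDictGetD tool_input "file_path" "?"
  else if tool_name == "Write" || tool_name == "write_file" then
    let path := pvDictGetD tool_input "file_path" "?"
    path ++ " (" ++ PySem.Int.toStr (PySem.Str.len (pvDictGetD tool_input "content" "")) ++ " chars)"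
  else if tool_name == "Edit" || tool_name == "edit_file" then
    pvDictGetD tool_input "file_path" "?"
  else if tool_name == "Bash" then
    let cmd := pvDictGetD tool_input "command" "?"
    PySem.Str.slice cmd none (some 80)
  else if tool_name == "Grep" || tool_name == "search_files" then
    pvDictGetD tool_input "pattern" "?"
  else if tool_name == "Glob" || tool_name == "list_files" then
    pvDictGetD tool_input "pattern" (pvDictGetD tool_input "path" "?")
  else
    match tool_input with
    | (k, v) :: _ => k ++ ": " ++ PySem.Str.slice v none (some 60)
    | [] => ""

-- ===== PORT B =====
-- recipe = (key chain, optional truncation limit, append-content-length flag)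
def pvRecipes : List (String × (List String × Option Int × Bool)) :=
  [("Read", (["file_path"], none, false)),
   ("read_file", (["file_path"], none, false)),
   ("Write", (["file_path"], none, true)),
   ("write_file", (["file_path"], none, true)),
   ("Edit", (["file_path"], none, false)),
   ("edit_file", (["file_path"], none, false)),
   ("Bash", (["command"], some 80, false)),
   ("Grep", (["pattern"], none, false)),
   ("search_files", (["pattern"], none, false)),
   ("Glob", (["pattern", "path"], none, false)),
   ("list_files", (["pattern", "path"], none, false))]

-- ti.get("content", "") in B's length computation
def pvAltGetContent (ti : List (String × String)) : String :=
  match ti.find? (fun p => p.1 == "content") with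
  | some p => p.2
  | none => ""

-- 'for key in keys: if key in tool_input: value = tool_input[key]; break' (value starts "?")
def pvFirstKey (keys : List String) (ti : List (String × String)) : String :=
  match keys with
  | [] => "?"
  | k :: ks =>
    match ti.find? (fun p => p.1 == k) with
    | some p => p.2
    | none => pvFirstKey ks ti

def summarize_tool_input_py_alt (tool_name : String) (tool_input : List (String × String)) : String :=
  match pvRecipes.find? (fun p => p.1 == tool_name) with
  | none =>
    match tool_input with
    | (k, v) :: _ => k ++ ": " ++ PySem.Str.slice v none (some 60)
    | [] => ""
  | some (_, keys, limit, withLen) =>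
    let value := pvFirstKey keys tool_input
    let value := match limit with
      | some n => PySem.Str.slice value none (some n)
      | none => value
    if withLen then
      value ++ " (" ++ PySem.Int.toStr (PySem.Str.len (pvAltGetContent tool_input)) ++ " chars)"
    else value

-- ===== PRECONDITION & SPEC =====
def Spec_summarize_tool_input_py (tool_name : String) (tool_input : List (String × String)) (out : String) : Prop := out = summarize_tool_input_py_alt tool_name tool_input
instance (tool_name : String) (tool_input : List (String × String)) (out : String) : Decidable (Spec_summarize_tool_input_py tool_name tool_input out) := by unfold Spec_summarize_tool_input_py; infer_instance

-- ===== CLAIM (what is proved, stated in full; the proofs are below) =====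
def Claim_equal_summarize_tool_input_py : Prop := ∀ (tool_name : String) (tool_input : List (String × String)), Dom_summarize_tool_input_py tool_name tool_input → Spec_summarize_tool_input_py tool_name tool_input (summarize_tool_input_py tool_name tool_input)

-- ===== LEMMAS AND PROOFS =====

-- ===== VERDICT (by name: the statement is the Claim_ definition above) =====
theorem summarize_tool_input_py_spec : Claim_equal_summarize_tool_input_py := by
  intro tn ti _
  unfold Spec_summarize_tool_input_py summarize_tool_input_py summarize_tool_input_py_alt pvRecipes
  by_cases h1 : tn = "Read"
  · simp [*, pvFirstKey, pvDictGetD, pvAltGetContent]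
  by_cases h2 : tn = "read_file"
  · simp [*, pvFirstKey, pvDictGetD, pvAltGetContent]
  by_cases h3 : tn = "Write"
  · simp [*, pvFirstKey, pvDictGetD, pvAltGetContent]
  by_cases h4 : tn = "write_file"
  · simp [*, pvFirstKey, pvDictGetD, pvAltGetContent]
  by_cases h5 : tn = "Edit"
  · simp [*, pvFirstKey, pvDictGetD, pvAltGetContent]
  by_cases h6 : tn = "edit_file"
  · simp [*, pvFirstKey, pvDictGetD, pvAltGetContent]
  by_cases h7 : tn = "Bash"
  · simp [*, pvFirstKey, pvDictGetD, pvAltGetContent]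
  by_cases h8 : tn = "Grep"
  · simp [*, pvFirstKey, pvDictGetD, pvAltGetContent]
  by_cases h9 : tn = "search_files"
  · simp [*, pvFirstKey, pvDictGetD, pvAltGetContent]
  by_cases h10 : tn = "Glob"
  · simp [*, pvFirstKey, pvDictGetD, pvAltGetContent]
  by_cases h11 : tn = "list_files"
  · simp [*, pvFirstKey, pvDictGetD, pvAltGetContent]
  · have e : ∀ s : String, tn ≠ s → (s == tn) = false := fun s hs => by
      simp only [beq_eq_false_iff_ne]; exact fun h => hs h.symm
    simp [List.find?, h1, h2, h3, h4, h5, h6, h7, h8, h9, h10, h11, e _ h1, e _ h2, e _ h3, e _ h4, e _ h5, e _ h6, e _ h7, e _ h8, e _ h9,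
      e _ h10, e _ h11]
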